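-- pv_equiv track=rewrite | github.com/pypi-data/pypi-mirror-157 | packages/thanhtungthaiatmethod/thanhtungthaiatmethod-2.1.0.tar.gz/thanhtungthaiatmethod-2.1.0/src/thanhtungthaiatmethod/methods.py | HanDuongCuu_HanHoiAchAmDuong
-- ===== SOURCE A (Python) =====
-- import math
--
-- def HanDuongCuu_HanHoiAchAmDuong(tichso):
--     tichso += 130
--     songuyenlondaqua = math.floor(tichso / 4560)
--     sonamdaqualon = tichso % 4560
--     thieulon = 4560 - sonamdaqualon
--     thieunho = 456 - (tichso - math.floor(tichso / 456) * 456)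
--     sonamhoiach = [106, 374, 480, 720, 720, 600, 600, 480, 480]
--     tenhoiach = ["9 nắng hạn", "9 nước lớn", "9 nắng hạn", "7 nước lớn",
--                  "7 nắng hạn", "5 nước lớn", "5 nắng hạn", "3 nước lớn", "3 nắng hạn"]
--     sonamluytien = [0, 0, 0, 0, 0, 0, 0, 0, 0]
--     sonamluytien[0] = sonamhoiach[0]
--     stt = 0
--     for i in range(len(sonamluytien)):
--         sonamluytien[i] = sonamluytien[i - 1] + sonamhoiach[i]
--
--     amduong = [0, 0, 0, 0, 0, 0, 0, 0, 0]
--     for j in range(len(sonamluytien)):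
--         amduong[j] = sonamluytien[j] - sonamdaqualon
--     if (amduong[0] > 0):
--         stt = 1
--     for k in range(len(amduong)):
--         if ((amduong[k] <= 0) and (amduong[k + 1] > 0)):
--             stt = k + 2
--     hanhoiachthu = stt
--     tenhanhoiachsaptoi = tenhoiach[stt - 1]
--     thieusohoiach = amduong[stt - 1]
--     return [str(thieulon), str(thieunho), str(hanhoiachthu), str(tenhanhoiachsaptoi), str(thieusohoiach), ]
-- ===== SOURCE B (Python) =====
-- from itertools import accumulate
-- from bisect import bisect_right
--
--
-- def HanDuongCuu_HanHoiAchAmDuong(tichso):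
--     tichso += 130
--     sonamdaqualon = tichso % 4560
--     thieulon = 4560 - sonamdaqualon
--     thieunho = 456 - tichso % 456
--     cumsum = list(accumulate([106, 374, 480, 720, 720, 600, 600, 480, 480]))
--     tenhoiach = ["9 nắng hạn", "9 nước lớn", "9 nắng hạn", "7 nước lớn",
--                  "7 nắng hạn", "5 nước lớn", "5 nắng hạn", "3 nước lớn", "3 nắng hạn"]
--     stt = bisect_right(cumsum, sonamdaqualon) + 1
--     return [str(thieulon), str(thieunho), str(stt),
--             str(tenhoiach[stt - 1]), str(cumsum[stt - 1] - sonamdaqualon)]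
-- ===== Notes on version B (the rewrite author's own statement) =====
-- stated objective: simpler
-- what changed: B replaces A's hand-built cumulative-sum array, the difference array and the linear sign-flip scan by itertools.accumulate plus a bisect_right binary search, dropping the float-based floor arithmetic for plain integer %.
import Mathlib
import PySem

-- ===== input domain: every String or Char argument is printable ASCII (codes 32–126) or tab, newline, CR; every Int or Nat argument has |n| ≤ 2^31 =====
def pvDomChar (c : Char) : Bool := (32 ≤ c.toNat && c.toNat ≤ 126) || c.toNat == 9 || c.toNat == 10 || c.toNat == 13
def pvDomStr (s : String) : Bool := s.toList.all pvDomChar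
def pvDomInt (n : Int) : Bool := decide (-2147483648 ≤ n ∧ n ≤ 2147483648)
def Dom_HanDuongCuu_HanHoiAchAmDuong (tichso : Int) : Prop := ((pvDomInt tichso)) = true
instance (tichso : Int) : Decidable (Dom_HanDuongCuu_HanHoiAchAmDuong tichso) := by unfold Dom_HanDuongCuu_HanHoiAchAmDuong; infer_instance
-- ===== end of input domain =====

-- B replaces A's hand-built cumulative table and linear sign-flip scan by accumulate + bisect_right (objective: simpler).
-- Within Dom (|tichso| ≤ 2^31) Python's math.floor(t/456) on floats equals integer floor division, so it is ported as floordiv.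

-- ===== PORT A =====
def pvSonamhoiach : List Int := [106, 374, 480, 720, 720, 600, 600, 480, 480]

def pvTenhoiachA : List String := ["9 nắng hạn", "9 nước lớn", "9 nắng hạn", "7 nước lớn",
  "7 nắng hạn", "5 nước lớn", "5 nắng hạn", "3 nước lớn", "3 nắng hạn"]

-- sonamluytien[0] = sonamhoiach[0]; for i in range(9): sonamluytien[i] = sonamluytien[i-1] + sonamhoiach[i]
-- (the i = 0 step reads sonamluytien[-1], Python's wraparound to the last element)
def pvLuytien : List Int :=
  (PySem.List.pyRange 0 9 1).foldl
    (fun l i => PySem.List.pySetD l i (PySem.List.pyGetD l (i - 1) 0 + PySem.List.pyGetD pvSonamhoiach i 0))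
    (PySem.List.pySetD [0, 0, 0, 0, 0, 0, 0, 0, 0] 0 (PySem.List.pyGetD pvSonamhoiach 0 0))

-- for j in range(9): amduong[j] = sonamluytien[j] - sonamdaqualon
def pvAmduong (sonamdaqualon : Int) : List Int :=
  (PySem.List.pyRange 0 9 1).foldl
    (fun l j => PySem.List.pySetD l j (PySem.List.pyGetD pvLuytien j 0 - sonamdaqualon))
    [0, 0, 0, 0, 0, 0, 0, 0, 0]

-- stt = 0; if amduong[0] > 0: stt = 1; for k in range(9): if amduong[k] <= 0 and amduong[k+1] > 0: stt = k + 2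
-- 'and' short-circuits, so amduong[9] is never read in Python (amduong[8] > 0 always); the getD default mirrors that the
-- inner test only fires when reached.
def pvSttA (amduong : List Int) : Int :=
  (PySem.List.pyRange 0 9 1).foldl
    (fun s k => if PySem.List.pyGetD amduong k 0 ≤ 0 then
                  (if PySem.List.pyGetD amduong (k + 1) 0 > 0 then k + 2 else s)
                else s)
    (if PySem.List.pyGetD amduong 0 0 > 0 then (1 : Int) else 0)

def HanDuongCuu_HanHoiAchAmDuong (tichso : Int) : List String :=
  let tichso := tichso + 130
  let _songuyenlondaqua := PySem.Int.floordiv tichso 4560   -- computed and unused, as in A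
  let sonamdaqualon := PySem.Int.mod tichso 4560
  let thieulon := 4560 - sonamdaqualon
  let thieunho := 456 - (tichso - PySem.Int.floordiv tichso 456 * 456)
  let amduong := pvAmduong sonamdaqualon
  let stt := pvSttA amduong
  [PySem.Int.toStr thieulon, PySem.Int.toStr thieunho, PySem.Int.toStr stt,
   PySem.List.pyGetD pvTenhoiachA (stt - 1) "",
   PySem.Int.toStr (PySem.List.pyGetD amduong (stt - 1) 0)]

-- ===== PORT B =====
-- list(accumulate(xs))
def pvAccumulate (xs : List Int) : List Int := (xs.scanl (· + ·) 0).tail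

def pvTenhoiachB : List String := ["9 nắng hạn", "9 nước lớn", "9 nắng hạn", "7 nước lớn",
  "7 nắng hạn", "5 nước lớn", "5 nắng hạn", "3 nước lớn", "3 nắng hạn"]

def HanDuongCuu_HanHoiAchAmDuong_alt (tichso : Int) : List String :=
  let tichso := tichso + 130
  let sonamdaqualon := PySem.Int.mod tichso 4560
  let thieulon := 4560 - sonamdaqualon
  let thieunho := 456 - PySem.Int.mod tichso 456
  let cumsum := pvAccumulate [106, 374, 480, 720, 720, 600, 600, 480, 480]
  let stt : Int := (PySem.List.bisectRight cumsum sonamdaqualon : Int) + 1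
  [PySem.Int.toStr thieulon, PySem.Int.toStr thieunho, PySem.Int.toStr stt,
   PySem.List.pyGetD pvTenhoiachB (stt - 1) "",
   PySem.Int.toStr (PySem.List.pyGetD cumsum (stt - 1) 0 - sonamdaqualon)]

-- ===== PRECONDITION & SPEC =====
def Spec_HanDuongCuu_HanHoiAchAmDuong (tichso : Int) (out : List String) : Prop := out = HanDuongCuu_HanHoiAchAmDuong_alt tichso
instance (tichso : Int) (out : List String) : Decidable (Spec_HanDuongCuu_HanHoiAchAmDuong tichso out) := by unfold Spec_HanDuongCuu_HanHoiAchAmDuong; infer_instance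

-- ===== CLAIM (what is proved, stated in full; the proofs are below) =====
def Claim_equal_HanDuongCuu_HanHoiAchAmDuong : Prop := ∀ (tichso : Int), Dom_HanDuongCuu_HanHoiAchAmDuong tichso → Spec_HanDuongCuu_HanHoiAchAmDuong tichso (HanDuongCuu_HanHoiAchAmDuong tichso)

-- ===== LEMMAS AND PROOFS =====

theorem pvAcc_val : pvAccumulate [106, 374, 480, 720, 720, 600, 600, 480, 480]
    = [106, 480, 960, 1680, 2400, 3000, 3600, 4080, 4560] := by decide

theorem pvRange9 : PySem.List.pyRange 0 9 1 = [0, 1, 2, 3, 4, 5, 6, 7, 8] := by decide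

theorem pvGet0 (a b c d e f g h i dflt : Int) : PySem.List.pyGetD [a, b, c, d, e, f, g, h, i] (0 : Int) dflt = a := rfl
theorem pvGet1 (a b c d e f g h i dflt : Int) : PySem.List.pyGetD [a, b, c, d, e, f, g, h, i] (1 : Int) dflt = b := rfl
theorem pvGet2 (a b c d e f g h i dflt : Int) : PySem.List.pyGetD [a, b, c, d, e, f, g, h, i] (2 : Int) dflt = c := rfl
theorem pvGet3 (a b c d e f g h i dflt : Int) : PySem.List.pyGetD [a, b, c, d, e, f, g, h, i] (3 : Int) dflt = d := rfl
theorem pvGet4 (a b c d e f g h i dflt : Int) : PySem.List.pyGetD [a, b, c, d, e, f, g, h, i] (4 : Int) dflt = e := rfl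
theorem pvGet5 (a b c d e f g h i dflt : Int) : PySem.List.pyGetD [a, b, c, d, e, f, g, h, i] (5 : Int) dflt = f := rfl
theorem pvGet6 (a b c d e f g h i dflt : Int) : PySem.List.pyGetD [a, b, c, d, e, f, g, h, i] (6 : Int) dflt = g := rfl
theorem pvGet7 (a b c d e f g h i dflt : Int) : PySem.List.pyGetD [a, b, c, d, e, f, g, h, i] (7 : Int) dflt = h := rfl
theorem pvGet8 (a b c d e f g h i dflt : Int) : PySem.List.pyGetD [a, b, c, d, e, f, g, h, i] (8 : Int) dflt = i := rfl
theorem pvGet9 (a b c d e f g h i dflt : Int) : PySem.List.pyGetD [a, b, c, d, e, f, g, h, i] (9 : Int) dflt = dflt := rfl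
theorem pvGetNeg1 (a b c d e f g h i dflt : Int) : PySem.List.pyGetD [a, b, c, d, e, f, g, h, i] (-1 : Int) dflt = i := rfl
theorem pvSet0 (a b c d e f g h i v : Int) : PySem.List.pySetD [a, b, c, d, e, f, g, h, i] (0 : Int) v = [v, b, c, d, e, f, g, h, i] := rfl
theorem pvSet1 (a b c d e f g h i v : Int) : PySem.List.pySetD [a, b, c, d, e, f, g, h, i] (1 : Int) v = [a, v, c, d, e, f, g, h, i] := rfl
theorem pvSet2 (a b c d e f g h i v : Int) : PySem.List.pySetD [a, b, c, d, e, f, g, h, i] (2 : Int) v = [a, b, v, d, e, f, g, h, i] := rfl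
theorem pvSet3 (a b c d e f g h i v : Int) : PySem.List.pySetD [a, b, c, d, e, f, g, h, i] (3 : Int) v = [a, b, c, v, e, f, g, h, i] := rfl
theorem pvSet4 (a b c d e f g h i v : Int) : PySem.List.pySetD [a, b, c, d, e, f, g, h, i] (4 : Int) v = [a, b, c, d, v, f, g, h, i] := rfl
theorem pvSet5 (a b c d e f g h i v : Int) : PySem.List.pySetD [a, b, c, d, e, f, g, h, i] (5 : Int) v = [a, b, c, d, e, v, g, h, i] := rfl
theorem pvSet6 (a b c d e f g h i v : Int) : PySem.List.pySetD [a, b, c, d, e, f, g, h, i] (6 : Int) v = [a, b, c, d, e, f, v, h, i] := rfl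
theorem pvSet7 (a b c d e f g h i v : Int) : PySem.List.pySetD [a, b, c, d, e, f, g, h, i] (7 : Int) v = [a, b, c, d, e, f, g, v, i] := rfl
theorem pvSet8 (a b c d e f g h i v : Int) : PySem.List.pySetD [a, b, c, d, e, f, g, h, i] (8 : Int) v = [a, b, c, d, e, f, g, h, v] := rfl

theorem pvAmduong_val (r : Int) :
    pvAmduong r = [106-r, 480-r, 960-r, 1680-r, 2400-r, 3000-r, 3600-r, 4080-r, 4560-r] := by
  unfold pvAmduong pvLuytien pvSonamhoiach
  rw [pvRange9]
  simp only [List.foldl, Int.reduceSub, Int.reduceAdd, pvSet0, pvSet1, pvSet2, pvSet3, pvSet4, pvSet5, pvSet6, pvSet7, pvSet8, pvGet0, pvGet1, pvGet2, pvGet3, pvGet4, pvGet5, pvGet6, pvGet7, pvGet8, pvGetNeg1]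

theorem pvSorted9 : List.Pairwise (fun x y => x ≤ y) ([106, 480, 960, 1680, 2400, 3000, 3600, 4080, 4560] : List Int) := by decide

set_option maxHeartbeats 2000000 in
theorem pvStt_eq (r : Int) (h0 : 0 ≤ r) (h1 : r < 4560) :
    pvSttA [106-r, 480-r, 960-r, 1680-r, 2400-r, 3000-r, 3600-r, 4080-r, 4560-r]
      = ((PySem.List.bisectRight ([106, 480, 960, 1680, 2400, 3000, 3600, 4080, 4560] : List Int) r : Nat) : Int) + 1 := by
  obtain ⟨hle, hlow, hhigh⟩ := PySem.List.bisectRight_spec [106, 480, 960, 1680, 2400, 3000, 3600, 4080, 4560] r pvSorted9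
  set n := PySem.List.bisectRight ([106, 480, 960, 1680, 2400, 3000, 3600, 4080, 4560] : List Int) r with hn
  have h9 : n ≤ 9 := by simpa using hle
  have c0 : 106 ≤ r ∨ n ≤ 0 := by
    rcases Nat.lt_or_ge 0 n with hx | hx
    · exact Or.inl (by simpa using hlow 0 (by norm_num) hx)
    · exact Or.inr (by omega)
  have d0 : r < 106 ∨ 1 ≤ n := by
    rcases Nat.lt_or_ge n 1 with hx | hx
    · exact Or.inl (by simpa using hhigh 0 (by norm_num) (by omega))
    · exact Or.inr (by omega)
  have c1 : 480 ≤ r ∨ n ≤ 1 := by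
    rcases Nat.lt_or_ge 1 n with hx | hx
    · exact Or.inl (by simpa using hlow 1 (by norm_num) hx)
    · exact Or.inr (by omega)
  have d1 : r < 480 ∨ 2 ≤ n := by
    rcases Nat.lt_or_ge n 2 with hx | hx
    · exact Or.inl (by simpa using hhigh 1 (by norm_num) (by omega))
    · exact Or.inr (by omega)
  have c2 : 960 ≤ r ∨ n ≤ 2 := by
    rcases Nat.lt_or_ge 2 n with hx | hx
    · exact Or.inl (by simpa using hlow 2 (by norm_num) hx)
    · exact Or.inr (by omega)
  have d2 : r < 960 ∨ 3 ≤ n := by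
    rcases Nat.lt_or_ge n 3 with hx | hx
    · exact Or.inl (by simpa using hhigh 2 (by norm_num) (by omega))
    · exact Or.inr (by omega)
  have c3 : 1680 ≤ r ∨ n ≤ 3 := by
    rcases Nat.lt_or_ge 3 n with hx | hx
    · exact Or.inl (by simpa using hlow 3 (by norm_num) hx)
    · exact Or.inr (by omega)
  have d3 : r < 1680 ∨ 4 ≤ n := by
    rcases Nat.lt_or_ge n 4 with hx | hx
    · exact Or.inl (by simpa using hhigh 3 (by norm_num) (by omega))
    · exact Or.inr (by omega)
  have c4 : 2400 ≤ r ∨ n ≤ 4 := by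
    rcases Nat.lt_or_ge 4 n with hx | hx
    · exact Or.inl (by simpa using hlow 4 (by norm_num) hx)
    · exact Or.inr (by omega)
  have d4 : r < 2400 ∨ 5 ≤ n := by
    rcases Nat.lt_or_ge n 5 with hx | hx
    · exact Or.inl (by simpa using hhigh 4 (by norm_num) (by omega))
    · exact Or.inr (by omega)
  have c5 : 3000 ≤ r ∨ n ≤ 5 := by
    rcases Nat.lt_or_ge 5 n with hx | hx
    · exact Or.inl (by simpa using hlow 5 (by norm_num) hx)
    · exact Or.inr (by omega)
  have d5 : r < 3000 ∨ 6 ≤ n := by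
    rcases Nat.lt_or_ge n 6 with hx | hx
    · exact Or.inl (by simpa using hhigh 5 (by norm_num) (by omega))
    · exact Or.inr (by omega)
  have c6 : 3600 ≤ r ∨ n ≤ 6 := by
    rcases Nat.lt_or_ge 6 n with hx | hx
    · exact Or.inl (by simpa using hlow 6 (by norm_num) hx)
    · exact Or.inr (by omega)
  have d6 : r < 3600 ∨ 7 ≤ n := by
    rcases Nat.lt_or_ge n 7 with hx | hx
    · exact Or.inl (by simpa using hhigh 6 (by norm_num) (by omega))
    · exact Or.inr (by omega)
  have c7 : 4080 ≤ r ∨ n ≤ 7 := by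
    rcases Nat.lt_or_ge 7 n with hx | hx
    · exact Or.inl (by simpa using hlow 7 (by norm_num) hx)
    · exact Or.inr (by omega)
  have d7 : r < 4080 ∨ 8 ≤ n := by
    rcases Nat.lt_or_ge n 8 with hx | hx
    · exact Or.inl (by simpa using hhigh 7 (by norm_num) (by omega))
    · exact Or.inr (by omega)
  have c8 : 4560 ≤ r ∨ n ≤ 8 := by
    rcases Nat.lt_or_ge 8 n with hx | hx
    · exact Or.inl (by simpa using hlow 8 (by norm_num) hx)
    · exact Or.inr (by omega)
  unfold pvSttA
  rw [pvRange9]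
  by_cases b0 : r < 106
  · have fA0 : ¬((106 : Int) - r ≤ 0) := by omega
    have fA1 : ¬((480 : Int) - r ≤ 0) := by omega
    have fA2 : ¬((960 : Int) - r ≤ 0) := by omega
    have fA3 : ¬((1680 : Int) - r ≤ 0) := by omega
    have fA4 : ¬((2400 : Int) - r ≤ 0) := by omega
    have fA5 : ¬((3000 : Int) - r ≤ 0) := by omega
    have fA6 : ¬((3600 : Int) - r ≤ 0) := by omega
    have fA7 : ¬((4080 : Int) - r ≤ 0) := by omega
    have fA8 : ¬((4560 : Int) - r ≤ 0) := by omega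
    have fB0 : (106 : Int) - r > 0 := by omega
    have fB1 : (480 : Int) - r > 0 := by omega
    have fB2 : (960 : Int) - r > 0 := by omega
    have fB3 : (1680 : Int) - r > 0 := by omega
    have fB4 : (2400 : Int) - r > 0 := by omega
    have fB5 : (3000 : Int) - r > 0 := by omega
    have fB6 : (3600 : Int) - r > 0 := by omega
    have fB7 : (4080 : Int) - r > 0 := by omega
    have fB8 : (4560 : Int) - r > 0 := by omega
    have fZ : ¬((0 : Int) > 0) := by omega
    simp only [List.foldl, Int.reduceAdd, pvGet0, pvGet1, pvGet2, pvGet3, pvGet4, pvGet5, pvGet6, pvGet7, pvGet8, pvGet9, fA0, fA1, fA2, fA3, fA4, fA5, fA6, fA7, fA8, fB0, fB1, fB2, fB3, fB4, fB5, fB6, fB7, fB8, fZ, if_true, if_false]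
    omega
  · by_cases b1 : r < 480
    · have fA0 : (106 : Int) - r ≤ 0 := by omega
      have fA1 : ¬((480 : Int) - r ≤ 0) := by omega
      have fA2 : ¬((960 : Int) - r ≤ 0) := by omega
      have fA3 : ¬((1680 : Int) - r ≤ 0) := by omega
      have fA4 : ¬((2400 : Int) - r ≤ 0) := by omega
      have fA5 : ¬((3000 : Int) - r ≤ 0) := by omega
      have fA6 : ¬((3600 : Int) - r ≤ 0) := by omega
      have fA7 : ¬((4080 : Int) - r ≤ 0) := by omega
      have fA8 : ¬((4560 : Int) - r ≤ 0) := by omega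
      have fB0 : ¬((106 : Int) - r > 0) := by omega
      have fB1 : (480 : Int) - r > 0 := by omega
      have fB2 : (960 : Int) - r > 0 := by omega
      have fB3 : (1680 : Int) - r > 0 := by omega
      have fB4 : (2400 : Int) - r > 0 := by omega
      have fB5 : (3000 : Int) - r > 0 := by omega
      have fB6 : (3600 : Int) - r > 0 := by omega
      have fB7 : (4080 : Int) - r > 0 := by omega
      have fB8 : (4560 : Int) - r > 0 := by omega
      have fZ : ¬((0 : Int) > 0) := by omega
      simp only [List.foldl, Int.reduceAdd, pvGet0, pvGet1, pvGet2, pvGet3, pvGet4, pvGet5, pvGet6, pvGet7, pvGet8, pvGet9, fA0, fA1, fA2, fA3, fA4, fA5, fA6, fA7, fA8, fB0, fB1, fB2, fB3, fB4, fB5, fB6, fB7, fB8, fZ, if_true, if_false]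
      omega
    · by_cases b2 : r < 960
      · have fA0 : (106 : Int) - r ≤ 0 := by omega
        have fA1 : (480 : Int) - r ≤ 0 := by omega
        have fA2 : ¬((960 : Int) - r ≤ 0) := by omega
        have fA3 : ¬((1680 : Int) - r ≤ 0) := by omega
        have fA4 : ¬((2400 : Int) - r ≤ 0) := by omega
        have fA5 : ¬((3000 : Int) - r ≤ 0) := by omega
        have fA6 : ¬((3600 : Int) - r ≤ 0) := by omega
        have fA7 : ¬((4080 : Int) - r ≤ 0) := by omega
        have fA8 : ¬((4560 : Int) - r ≤ 0) := by omega
        have fB0 : ¬((106 : Int) - r > 0) := by omega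
        have fB1 : ¬((480 : Int) - r > 0) := by omega
        have fB2 : (960 : Int) - r > 0 := by omega
        have fB3 : (1680 : Int) - r > 0 := by omega
        have fB4 : (2400 : Int) - r > 0 := by omega
        have fB5 : (3000 : Int) - r > 0 := by omega
        have fB6 : (3600 : Int) - r > 0 := by omega
        have fB7 : (4080 : Int) - r > 0 := by omega
        have fB8 : (4560 : Int) - r > 0 := by omega
        have fZ : ¬((0 : Int) > 0) := by omega
        simp only [List.foldl, Int.reduceAdd, pvGet0, pvGet1, pvGet2, pvGet3, pvGet4, pvGet5, pvGet6, pvGet7, pvGet8, pvGet9, fA0, fA1, fA2, fA3, fA4, fA5, fA6, fA7, fA8, fB0, fB1, fB2, fB3, fB4, fB5, fB6, fB7, fB8, fZ, if_true, if_false]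
        omega
      · by_cases b3 : r < 1680
        · have fA0 : (106 : Int) - r ≤ 0 := by omega
          have fA1 : (480 : Int) - r ≤ 0 := by omega
          have fA2 : (960 : Int) - r ≤ 0 := by omega
          have fA3 : ¬((1680 : Int) - r ≤ 0) := by omega
          have fA4 : ¬((2400 : Int) - r ≤ 0) := by omega
          have fA5 : ¬((3000 : Int) - r ≤ 0) := by omega
          have fA6 : ¬((3600 : Int) - r ≤ 0) := by omega
          have fA7 : ¬((4080 : Int) - r ≤ 0) := by omega
          have fA8 : ¬((4560 : Int) - r ≤ 0) := by omega
          have fB0 : ¬((106 : Int) - r > 0) := by omega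
          have fB1 : ¬((480 : Int) - r > 0) := by omega
          have fB2 : ¬((960 : Int) - r > 0) := by omega
          have fB3 : (1680 : Int) - r > 0 := by omega
          have fB4 : (2400 : Int) - r > 0 := by omega
          have fB5 : (3000 : Int) - r > 0 := by omega
          have fB6 : (3600 : Int) - r > 0 := by omega
          have fB7 : (4080 : Int) - r > 0 := by omega
          have fB8 : (4560 : Int) - r > 0 := by omega
          have fZ : ¬((0 : Int) > 0) := by omega
          simp only [List.foldl, Int.reduceAdd, pvGet0, pvGet1, pvGet2, pvGet3, pvGet4, pvGet5, pvGet6, pvGet7, pvGet8, pvGet9, fA0, fA1, fA2, fA3, fA4, fA5, fA6, fA7, fA8, fB0, fB1, fB2, fB3, fB4, fB5, fB6, fB7, fB8, fZ, if_true, if_false]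
          omega
        · by_cases b4 : r < 2400
          · have fA0 : (106 : Int) - r ≤ 0 := by omega
            have fA1 : (480 : Int) - r ≤ 0 := by omega
            have fA2 : (960 : Int) - r ≤ 0 := by omega
            have fA3 : (1680 : Int) - r ≤ 0 := by omega
            have fA4 : ¬((2400 : Int) - r ≤ 0) := by omega
            have fA5 : ¬((3000 : Int) - r ≤ 0) := by omega
            have fA6 : ¬((3600 : Int) - r ≤ 0) := by omega
            have fA7 : ¬((4080 : Int) - r ≤ 0) := by omega
            have fA8 : ¬((4560 : Int) - r ≤ 0) := by omega
            have fB0 : ¬((106 : Int) - r > 0) := by omega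
            have fB1 : ¬((480 : Int) - r > 0) := by omega
            have fB2 : ¬((960 : Int) - r > 0) := by omega
            have fB3 : ¬((1680 : Int) - r > 0) := by omega
            have fB4 : (2400 : Int) - r > 0 := by omega
            have fB5 : (3000 : Int) - r > 0 := by omega
            have fB6 : (3600 : Int) - r > 0 := by omega
            have fB7 : (4080 : Int) - r > 0 := by omega
            have fB8 : (4560 : Int) - r > 0 := by omega
            have fZ : ¬((0 : Int) > 0) := by omega
            simp only [List.foldl, Int.reduceAdd, pvGet0, pvGet1, pvGet2, pvGet3, pvGet4, pvGet5, pvGet6, pvGet7, pvGet8, pvGet9, fA0, fA1, fA2, fA3, fA4, fA5, fA6, fA7, fA8, fB0, fB1, fB2, fB3, fB4, fB5, fB6, fB7, fB8, fZ, if_true, if_false]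
            omega
          · by_cases b5 : r < 3000
            · have fA0 : (106 : Int) - r ≤ 0 := by omega
              have fA1 : (480 : Int) - r ≤ 0 := by omega
              have fA2 : (960 : Int) - r ≤ 0 := by omega
              have fA3 : (1680 : Int) - r ≤ 0 := by omega
              have fA4 : (2400 : Int) - r ≤ 0 := by omega
              have fA5 : ¬((3000 : Int) - r ≤ 0) := by omega
              have fA6 : ¬((3600 : Int) - r ≤ 0) := by omega
              have fA7 : ¬((4080 : Int) - r ≤ 0) := by omega
              have fA8 : ¬((4560 : Int) - r ≤ 0) := by omega
              have fB0 : ¬((106 : Int) - r > 0) := by omega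
              have fB1 : ¬((480 : Int) - r > 0) := by omega
              have fB2 : ¬((960 : Int) - r > 0) := by omega
              have fB3 : ¬((1680 : Int) - r > 0) := by omega
              have fB4 : ¬((2400 : Int) - r > 0) := by omega
              have fB5 : (3000 : Int) - r > 0 := by omega
              have fB6 : (3600 : Int) - r > 0 := by omega
              have fB7 : (4080 : Int) - r > 0 := by omega
              have fB8 : (4560 : Int) - r > 0 := by omega
              have fZ : ¬((0 : Int) > 0) := by omega
              simp only [List.foldl, Int.reduceAdd, pvGet0, pvGet1, pvGet2, pvGet3, pvGet4, pvGet5, pvGet6, pvGet7, pvGet8, pvGet9, fA0, fA1, fA2, fA3, fA4, fA5, fA6, fA7, fA8, fB0, fB1, fB2, fB3, fB4, fB5, fB6, fB7, fB8, fZ, if_true, if_false]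
              omega
            · by_cases b6 : r < 3600
              · have fA0 : (106 : Int) - r ≤ 0 := by omega
                have fA1 : (480 : Int) - r ≤ 0 := by omega
                have fA2 : (960 : Int) - r ≤ 0 := by omega
                have fA3 : (1680 : Int) - r ≤ 0 := by omega
                have fA4 : (2400 : Int) - r ≤ 0 := by omega
                have fA5 : (3000 : Int) - r ≤ 0 := by omega
                have fA6 : ¬((3600 : Int) - r ≤ 0) := by omega
                have fA7 : ¬((4080 : Int) - r ≤ 0) := by omega
                have fA8 : ¬((4560 : Int) - r ≤ 0) := by omega
                have fB0 : ¬((106 : Int) - r > 0) := by omega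
                have fB1 : ¬((480 : Int) - r > 0) := by omega
                have fB2 : ¬((960 : Int) - r > 0) := by omega
                have fB3 : ¬((1680 : Int) - r > 0) := by omega
                have fB4 : ¬((2400 : Int) - r > 0) := by omega
                have fB5 : ¬((3000 : Int) - r > 0) := by omega
                have fB6 : (3600 : Int) - r > 0 := by omega
                have fB7 : (4080 : Int) - r > 0 := by omega
                have fB8 : (4560 : Int) - r > 0 := by omega
                have fZ : ¬((0 : Int) > 0) := by omega
                simp only [List.foldl, Int.reduceAdd, pvGet0, pvGet1, pvGet2, pvGet3, pvGet4, pvGet5, pvGet6, pvGet7, pvGet8, pvGet9, fA0, fA1, fA2, fA3, fA4, fA5, fA6, fA7, fA8, fB0, fB1, fB2, fB3, fB4, fB5, fB6, fB7, fB8, fZ, if_true, if_false]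
                omega
              · by_cases b7 : r < 4080
                · have fA0 : (106 : Int) - r ≤ 0 := by omega
                  have fA1 : (480 : Int) - r ≤ 0 := by omega
                  have fA2 : (960 : Int) - r ≤ 0 := by omega
                  have fA3 : (1680 : Int) - r ≤ 0 := by omega
                  have fA4 : (2400 : Int) - r ≤ 0 := by omega
                  have fA5 : (3000 : Int) - r ≤ 0 := by omega
                  have fA6 : (3600 : Int) - r ≤ 0 := by omega
                  have fA7 : ¬((4080 : Int) - r ≤ 0) := by omega
                  have fA8 : ¬((4560 : Int) - r ≤ 0) := by omega
                  have fB0 : ¬((106 : Int) - r > 0) := by omega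
                  have fB1 : ¬((480 : Int) - r > 0) := by omega
                  have fB2 : ¬((960 : Int) - r > 0) := by omega
                  have fB3 : ¬((1680 : Int) - r > 0) := by omega
                  have fB4 : ¬((2400 : Int) - r > 0) := by omega
                  have fB5 : ¬((3000 : Int) - r > 0) := by omega
                  have fB6 : ¬((3600 : Int) - r > 0) := by omega
                  have fB7 : (4080 : Int) - r > 0 := by omega
                  have fB8 : (4560 : Int) - r > 0 := by omega
                  have fZ : ¬((0 : Int) > 0) := by omega
                  simp only [List.foldl, Int.reduceAdd, pvGet0, pvGet1, pvGet2, pvGet3, pvGet4, pvGet5, pvGet6, pvGet7, pvGet8, pvGet9, fA0, fA1, fA2, fA3, fA4, fA5, fA6, fA7, fA8, fB0, fB1, fB2, fB3, fB4, fB5, fB6, fB7, fB8, fZ, if_true, if_false]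
                  omega
                · have fA0 : (106 : Int) - r ≤ 0 := by omega
                  have fA1 : (480 : Int) - r ≤ 0 := by omega
                  have fA2 : (960 : Int) - r ≤ 0 := by omega
                  have fA3 : (1680 : Int) - r ≤ 0 := by omega
                  have fA4 : (2400 : Int) - r ≤ 0 := by omega
                  have fA5 : (3000 : Int) - r ≤ 0 := by omega
                  have fA6 : (3600 : Int) - r ≤ 0 := by omega
                  have fA7 : (4080 : Int) - r ≤ 0 := by omega
                  have fA8 : ¬((4560 : Int) - r ≤ 0) := by omega
                  have fB0 : ¬((106 : Int) - r > 0) := by omega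
                  have fB1 : ¬((480 : Int) - r > 0) := by omega
                  have fB2 : ¬((960 : Int) - r > 0) := by omega
                  have fB3 : ¬((1680 : Int) - r > 0) := by omega
                  have fB4 : ¬((2400 : Int) - r > 0) := by omega
                  have fB5 : ¬((3000 : Int) - r > 0) := by omega
                  have fB6 : ¬((3600 : Int) - r > 0) := by omega
                  have fB7 : ¬((4080 : Int) - r > 0) := by omega
                  have fB8 : (4560 : Int) - r > 0 := by omega
                  have fZ : ¬((0 : Int) > 0) := by omega
                  simp only [List.foldl, Int.reduceAdd, pvGet0, pvGet1, pvGet2, pvGet3, pvGet4, pvGet5, pvGet6, pvGet7, pvGet8, pvGet9, fA0, fA1, fA2, fA3, fA4, fA5, fA6, fA7, fA8, fB0, fB1, fB2, fB3, fB4, fB5, fB6, fB7, fB8, fZ, if_true, if_false]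
                  omega

theorem pvBisect_le (r : Int) (h1 : r < 4560) :
    PySem.List.bisectRight ([106, 480, 960, 1680, 2400, 3000, 3600, 4080, 4560] : List Int) r ≤ 8 := by
  obtain ⟨hle, hlow, hhigh⟩ := PySem.List.bisectRight_spec [106, 480, 960, 1680, 2400, 3000, 3600, 4080, 4560] r pvSorted9
  by_contra hc
  have h9 : PySem.List.bisectRight ([106, 480, 960, 1680, 2400, 3000, 3600, 4080, 4560] : List Int) r ≤ 9 := by simpa using hle
  have := hlow 8 (by norm_num) (by omega)
  simp at this
  omega

theorem pvGap (r : Int) (h1 : r < 4560) :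
    PySem.List.pyGetD [106-r, 480-r, 960-r, 1680-r, 2400-r, 3000-r, 3600-r, 4080-r, 4560-r] (((PySem.List.bisectRight ([106, 480, 960, 1680, 2400, 3000, 3600, 4080, 4560] : List Int) r : Nat) : Int) + 1 - 1) 0
      = PySem.List.pyGetD ([106, 480, 960, 1680, 2400, 3000, 3600, 4080, 4560] : List Int) (((PySem.List.bisectRight ([106, 480, 960, 1680, 2400, 3000, 3600, 4080, 4560] : List Int) r : Nat) : Int) + 1 - 1) 0 - r := by
  have h8 := pvBisect_le r h1
  generalize PySem.List.bisectRight ([106, 480, 960, 1680, 2400, 3000, 3600, 4080, 4560] : List Int) r = n at h8 ⊢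
  interval_cases n <;> rfl

-- ===== VERDICT (by name: the statement is the Claim_ definition above) =====
theorem HanDuongCuu_HanHoiAchAmDuong_spec : Claim_equal_HanDuongCuu_HanHoiAchAmDuong := by
  intro t _
  unfold Spec_HanDuongCuu_HanHoiAchAmDuong HanDuongCuu_HanHoiAchAmDuong HanDuongCuu_HanHoiAchAmDuong_alt
  have h0 : 0 ≤ PySem.Int.mod (t + 130) 4560 := PySem.Int.mod_nonneg _ (by norm_num)
  have h1 : PySem.Int.mod (t + 130) 4560 < 4560 := PySem.Int.mod_lt _ (by norm_num)
  have hnho : (t + 130) - PySem.Int.floordiv (t + 130) 456 * 456 = PySem.Int.mod (t + 130) 456 := by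
    have := PySem.Int.floordiv_mul_add_mod (t + 130) 456
    omega
  simp only [hnho, pvAcc_val, pvAmduong_val, pvStt_eq _ h0 h1, pvGap _ h1,
    pvTenhoiachA, pvTenhoiachB]
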